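-- pv_equiv track=rewrite | github.com/ModithaLekkala/-AI-Capstone- | tf_pipelines/tf_bnn_exec_128-32-8-2_4nr/tofino_controller.py | cover_range_with_prefixes
-- ===== SOURCE A (Python) =====
-- def cover_range_with_prefixes(start, end, width):
--     """
--     Return list of (value, mask) pairs whose ternary masks cover [start..end].
--     """
--     prefixes = []
--     cur = start
--     while cur <= end:
--         blk = 1
--         # grow block while aligned and within end
--         while (cur & blk) == 0 and cur + (blk << 1) - 1 <= end:
--             blk <<= 1
--         mask = (~(blk - 1)) & ((1 << width) - 1)
--         prefixes.append((cur, mask))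
--         cur += blk
--     return prefixes
-- ===== SOURCE B (Python) =====
-- def cover_range_with_prefixes(start, end, width):
--     """
--     Return list of (value, mask) pairs whose ternary masks cover [start..end].
--     Computes each block size directly from the lowest set bit of cur and the
--     bit-length of the remaining range, instead of growing it bit by bit.
--     """
--     full = (1 << width) - 1
--     prefixes = []
--     cur = start
--     while cur <= end:
--         low = cur & -cur
--         span = (end - cur + 1).bit_length() - 1
--         t = span if low == 0 else min(low.bit_length() - 1, span)
--         blk = 1 << t
--         prefixes.append((cur, ~(blk - 1) & full))
--         cur += blk
--     return prefixes
-- ===== Notes on version B (the rewrite author's own statement) =====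
-- stated objective: faster
-- what changed: A grows each aligned block bit by bit in an inner while loop; B computes each block size in O(1) from the lowest set bit of cur (cur & -cur) and the bit-length of the remaining range, removing the inner loop (and hoists the width mask out of the loop).
-- outside the precondition, e.g. on cover_range_with_prefixes(5, 3, -1): A returns [], B raises ValueError
import Mathlib
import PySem

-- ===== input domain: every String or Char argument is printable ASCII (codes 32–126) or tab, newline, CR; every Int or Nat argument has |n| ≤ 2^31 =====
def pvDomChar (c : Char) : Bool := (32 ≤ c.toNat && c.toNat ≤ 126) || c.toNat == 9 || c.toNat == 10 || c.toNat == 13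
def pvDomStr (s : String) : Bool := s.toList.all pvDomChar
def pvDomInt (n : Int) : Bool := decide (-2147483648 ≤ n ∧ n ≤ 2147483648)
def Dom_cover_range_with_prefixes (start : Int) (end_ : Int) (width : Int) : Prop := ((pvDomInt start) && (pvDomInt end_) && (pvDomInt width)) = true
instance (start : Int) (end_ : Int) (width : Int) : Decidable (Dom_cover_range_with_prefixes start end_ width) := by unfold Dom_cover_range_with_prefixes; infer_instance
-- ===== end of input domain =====

-- B replaces A's bit-by-bit inner block-growing loop with a direct computation of each
-- block size from the lowest set bit of cur and the bit-length of the remaining range.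

-- ===== PORT A =====
-- inner while loop: grow blk while aligned and within end ('0 < blk' is a totality
-- guard only — blk starts at 1 and only doubles, so it always holds in A's run)
def growBlk (cur : Int) (end_ : Int) (blk : Int) : Int :=
  if h : PySem.Int.band cur blk = 0 ∧ cur + (blk <<< (1 : Nat)) - 1 ≤ end_ ∧ 0 < blk then
    growBlk cur end_ (blk <<< (1 : Nat))
  else blk
termination_by (end_ + 1 - cur - blk).toNat
decreasing_by
  rcases h with ⟨-, h2, h3⟩
  rw [Int.shiftLeft_eq] at h2 ⊢
  simp only [pow_one] at h2 ⊢
  omega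

-- growBlk keeps its argument positive (needed for the outer loop's termination)
theorem growBlk_pos (cur : Int) (end_ : Int) (blk : Int) (h : 0 < blk) :
    0 < growBlk cur end_ blk := by
  by_cases hg : PySem.Int.band cur blk = 0 ∧ cur + (blk <<< (1 : Nat)) - 1 ≤ end_ ∧ 0 < blk
  · rw [growBlk, dif_pos hg]
    exact growBlk_pos cur end_ _ (by rw [Int.shiftLeft_eq]; omega)
  · rw [growBlk, dif_neg hg]
    exact h
termination_by (end_ + 1 - cur - blk).toNat
decreasing_by
  rcases hg with ⟨-, h2, h3⟩
  rw [Int.shiftLeft_eq] at h2 ⊢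
  simp only [pow_one] at h2 ⊢
  omega

-- outer while loop of A ('1 << width' ported as '1 <<< width.toNat', exact for 0 ≤ width = Pre_)
def coverLoop (end_ : Int) (width : Int) (cur : Int) : List (List Int) :=
  if h : cur ≤ end_ then
    [cur, PySem.Int.band (Int.not (growBlk cur end_ 1 - 1)) (((1 : Int) <<< width.toNat) - 1)] ::
      coverLoop end_ width (cur + growBlk cur end_ 1)
  else []
termination_by (end_ + 1 - cur).toNat
decreasing_by
  have := growBlk_pos cur end_ 1 (by norm_num)
  omega

def cover_range_with_prefixes (start : Int) (end_ : Int) (width : Int) : List (List Int) :=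
  coverLoop end_ width start

-- ===== PORT B =====
-- one loop step of B: low, span, t, blk computed directly from cur and the remaining range
def blkOf (end_ : Int) (cur : Int) : Int :=
  let low := PySem.Int.band cur (-cur)
  let span := PySem.Int.bitLength (end_ - cur + 1) - 1
  let t := if low = 0 then span else min (PySem.Int.bitLength low - 1) span
  (1 : Int) <<< t

theorem blkOf_pos (end_ : Int) (cur : Int) : 0 < blkOf end_ cur := by
  unfold blkOf
  rw [Int.shiftLeft_eq]
  positivity

-- loop of B ('1 << width' as above)
def altLoop (end_ : Int) (full : Int) (cur : Int) : List (List Int) :=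
  if h : cur ≤ end_ then
    [cur, PySem.Int.band (Int.not (blkOf end_ cur - 1)) full] ::
      altLoop end_ full (cur + blkOf end_ cur)
  else []
termination_by (end_ + 1 - cur).toNat
decreasing_by
  have := blkOf_pos end_ cur
  omega

def cover_range_with_prefixes_alt (start : Int) (end_ : Int) (width : Int) : List (List Int) :=
  altLoop end_ (((1 : Int) <<< width.toNat) - 1) start

-- ===== PRECONDITION & SPEC =====
-- Pre_ excludes width < 0, where Python's '1 << width' raises ValueError: A raises whenever
-- it reaches the loop body (start ≤ end), and B raises always (it computes the mask up front).
def Pre_cover_range_with_prefixes (_start : Int) (_end_ : Int) (width : Int) : Prop := 0 ≤ width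
instance (start : Int) (end_ : Int) (width : Int) : Decidable (Pre_cover_range_with_prefixes start end_ width) := by unfold Pre_cover_range_with_prefixes; infer_instance
def pvWitness_cover_range_with_prefixes : Int × Int × Int := (0, 7, 4)

def Spec_cover_range_with_prefixes (start : Int) (end_ : Int) (width : Int) (out : List (List Int)) : Prop := out = cover_range_with_prefixes_alt start end_ width
instance (start : Int) (end_ : Int) (width : Int) (out : List (List Int)) : Decidable (Spec_cover_range_with_prefixes start end_ width out) := by unfold Spec_cover_range_with_prefixes; infer_instance

-- ===== CLAIM (what is proved, stated in full; the proofs are below) =====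
def Claim_equal_cover_range_with_prefixes : Prop := ∀ (start : Int) (end_ : Int) (width : Int), Dom_cover_range_with_prefixes start end_ width → Pre_cover_range_with_prefixes start end_ width → Spec_cover_range_with_prefixes start end_ width (cover_range_with_prefixes start end_ width)

-- ===== LEMMAS AND PROOFS =====

-- odd numbers: bit 0 and the relation between m and m-1 on higher bits
theorem odd_testBit_zero (m : Nat) (h : Odd m) : m.testBit 0 = true := by
  have := Nat.odd_iff.mp h
  simp [Nat.testBit_eq_decide_div_mod_eq]; omega

theorem pred_odd_testBit_zero (m : Nat) (h : Odd m) : (m - 1).testBit 0 = false := by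
  have := Nat.odd_iff.mp h
  simp [Nat.testBit_eq_decide_div_mod_eq]; omega

theorem testBit_pred_high (m i : Nat) (h : Odd m) (hi : 1 ≤ i) :
    m.testBit i = (m - 1).testBit i := by
  have hm := Nat.odd_iff.mp h
  have h2 : (2 : Nat) ^ i = 2 * 2 ^ (i - 1) := by
    rw [← pow_succ']; congr 1; omega
  have hdiv : m / 2 ^ i = (m - 1) / 2 ^ i := by
    rw [h2, ← Nat.div_div_eq_div_mul, ← Nat.div_div_eq_div_mul]
    congr 1; omega
  simp [Nat.testBit_eq_decide_div_mod_eq, hdiv]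

-- decomposition of n - 1 for n = 2^c * m, m odd
theorem pred_decomp (c m : Nat) (h : Odd m) :
    2 ^ c * m - 1 = 2 ^ c * (m - 1) + (2 ^ c - 1) := by
  have hm : 1 ≤ m := by have := Nat.odd_iff.mp h; omega
  obtain ⟨k, rfl⟩ := Nat.exists_eq_add_of_le hm
  have e1 : 2 ^ c * (1 + k) = 2 ^ c * k + 2 ^ c := by ring
  have e2 : 2 ^ c * (1 + k - 1) = 2 ^ c * k := by rw [show 1 + k - 1 = k by omega]
  have hp : 1 ≤ 2 ^ c := Nat.one_le_two_pow
  omega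

theorem pred_testBit (c m j : Nat) (h : Odd m) :
    (2 ^ c * m - 1).testBit j = if j < c then true else (m - 1).testBit (j - c) := by
  rw [pred_decomp c m h,
      Nat.testBit_two_pow_mul_add _ (by have : 1 ≤ 2 ^ c := Nat.one_le_two_pow; omega)]
  by_cases hj : j < c
  · simp [hj, Nat.testBit_two_pow_sub_one]
  · simp [hj]

-- n &&& (n - 1) clears the lowest set bit
theorem land_pred (c m : Nat) (h : Odd m) :
    (2 ^ c * m) &&& (2 ^ c * m - 1) = 2 ^ c * (m - 1) := by
  apply Nat.eq_of_testBit_eq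
  intro j
  rw [Nat.testBit_land, pred_testBit c m j h, Nat.testBit_two_pow_mul, Nat.testBit_two_pow_mul]
  by_cases hj : j < c
  · simp [hj, Nat.not_le_of_lt hj]
  · rw [Nat.not_lt] at hj
    rcases Nat.lt_or_ge c j with hcj | hcj
    · have hi : 1 ≤ j - c := by omega
      rw [← testBit_pred_high m (j - c) h hi]
      simp [hj, show ¬ j < c by omega]
    · have : j = c := by omega
      subst this
      rw [Nat.sub_self]
      simp [odd_testBit_zero m h, pred_odd_testBit_zero m h]

-- band cur (-cur) as a Nat expression on n = |cur|
theorem band_neg_self (cur : Int) (h : cur ≠ 0) :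
    PySem.Int.band cur (-cur) =
      ((cur.natAbs - (cur.natAbs &&& (cur.natAbs - 1)) : Nat) : Int) := by
  rcases lt_trichotomy cur 0 with h1 | h1 | h1
  · simp only [PySem.Int.band, if_neg (by omega : ¬ (0 : Int) ≤ cur),
      if_pos (by omega : (0 : Int) ≤ -cur)]
    have e1 : (-cur).toNat = cur.natAbs := by omega
    have e2 : (-cur - 1).toNat = cur.natAbs - 1 := by omega
    rw [e1, e2]
  · exact absurd h1 h
  · simp only [PySem.Int.band, if_pos (by omega : (0 : Int) ≤ cur),
      if_neg (by omega : ¬ (0 : Int) ≤ -cur)]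
    have e1 : cur.toNat = cur.natAbs := by omega
    have e2 : (- -cur - 1).toNat = cur.natAbs - 1 := by omega
    rw [e1, e2]

theorem band_lowbit (cur : Int) (c m : Nat) (hm : Odd m)
    (hn : cur.natAbs = 2 ^ c * m) (h0 : cur ≠ 0) :
    PySem.Int.band cur (-cur) = (2 : Int) ^ c := by
  rw [band_neg_self cur h0, hn, land_pred c m hm]
  have hm1 : 1 ≤ m := by have := Nat.odd_iff.mp hm; omega
  obtain ⟨k, rfl⟩ := Nat.exists_eq_add_of_le hm1
  have e1 : 2 ^ c * (1 + k) = 2 ^ c * k + 2 ^ c := by ring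
  have e2 : 2 ^ c * (1 + k - 1) = 2 ^ c * k := by rw [show 1 + k - 1 = k by omega]
  rw [e2, e1, Nat.add_sub_cancel_left]
  push_cast; ring

-- band cur (2^j) for j ≤ c (c = number of trailing zeros of cur)
theorem band_two_pow (cur : Int) (c m j : Nat) (hm : Odd m)
    (hn : cur.natAbs = 2 ^ c * m) (h0 : cur ≠ 0) (hj : j ≤ c) :
    PySem.Int.band cur ((2 : Int) ^ j) = if j < c then 0 else (2 : Int) ^ c := by
  have hcast : ((2 : Int) ^ j) = ((2 ^ j : Nat) : Int) := by push_cast; ring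
  rcases lt_trichotomy cur 0 with h1 | h1 | h1
  · rw [PySem.Int.band_comm]
    simp only [PySem.Int.band, if_pos (by positivity : (0 : Int) ≤ (2 : Int) ^ j),
      if_neg (by omega : ¬ (0 : Int) ≤ cur)]
    have e1 : ((2 : Int) ^ j).toNat = 2 ^ j := by rw [hcast]; exact Int.toNat_natCast _
    have e2 : (-cur - 1).toNat = cur.natAbs - 1 := by omega
    rw [e1, e2, hn, Nat.two_pow_and, pred_testBit c m j hm]
    by_cases hjc : j < c
    · rw [if_pos hjc, if_pos hjc]
      simp
    · have : j = c := by omega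
      subst this
      rw [if_neg hjc, if_neg hjc, Nat.sub_self, pred_odd_testBit_zero m hm]
      simp only [Bool.toNat_false, Nat.mul_zero, Nat.sub_zero]
      push_cast
      ring
  · exact absurd h1 h0
  · rw [PySem.Int.band_of_nonneg (by omega) (by positivity)]
    have e1 : cur.toNat = cur.natAbs := by omega
    have e2 : ((2 : Int) ^ j).toNat = 2 ^ j := by rw [hcast]; exact Int.toNat_natCast _
    rw [e1, e2, hn, Nat.and_two_pow, Nat.testBit_two_pow_mul]
    by_cases hjc : j < c
    · rw [if_pos hjc]
      simp [show ¬ c ≤ j by omega]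
    · have : j = c := by omega
      subst this
      rw [if_neg hjc, Nat.sub_self, odd_testBit_zero m hm]
      simp only [le_refl, decide_true, Bool.and_true, Bool.toNat_true, Nat.one_mul]
      push_cast
      ring

theorem bitLength_two_pow (c : Nat) : PySem.Int.bitLength ((2 : Int) ^ c) = c + 1 := by
  have h1 := PySem.Int.lt_two_pow_bitLength ((2 : Int) ^ c)
  have h2 := PySem.Int.two_pow_bitLength_le ((2 : Int) ^ c) (by positivity)
  have hn : ((2 : Int) ^ c).natAbs = 2 ^ c := by
    rw [show ((2 : Int) ^ c) = ((2 ^ c : Nat) : Int) by push_cast; ring, Int.natAbs_natCast]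
  rw [hn] at h1 h2
  have hb1 : c < PySem.Int.bitLength ((2 : Int) ^ c) :=
    (Nat.pow_lt_pow_iff_right (by norm_num)).mp h1
  have hb2 : PySem.Int.bitLength ((2 : Int) ^ c) - 1 ≤ c :=
    (Nat.pow_le_pow_iff_right (by norm_num)).mp h2
  omega

-- bounds from the bit-length of the remaining range
theorem span_bounds (L : Int) (h : 1 ≤ L) :
    (2 : Int) ^ (PySem.Int.bitLength L - 1) ≤ L ∧
      L < 2 ^ (PySem.Int.bitLength L - 1 + 1) ∧ 1 ≤ PySem.Int.bitLength L := by
  have h1 := PySem.Int.lt_two_pow_bitLength L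
  have h2 := PySem.Int.two_pow_bitLength_le L (by omega)
  have hb : 1 ≤ PySem.Int.bitLength L := by
    by_contra hb
    have hz : PySem.Int.bitLength L = 0 := by omega
    rw [hz] at h1
    simp at h1
    omega
  have hcast : (L.natAbs : Int) = L := by omega
  refine ⟨?_, ?_, hb⟩
  · calc (2 : Int) ^ (PySem.Int.bitLength L - 1)
        = ((2 ^ (PySem.Int.bitLength L - 1) : Nat) : Int) := by push_cast; ring
      _ ≤ (L.natAbs : Int) := by exact_mod_cast h2
      _ = L := hcast
  · calc L = (L.natAbs : Int) := hcast.symm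
      _ < ((2 ^ PySem.Int.bitLength L : Nat) : Int) := by exact_mod_cast h1
      _ = 2 ^ (PySem.Int.bitLength L - 1 + 1) := by push_cast; congr 1; omega

-- characterization of A's inner loop: it returns 2^t for the stated stopping index t
theorem growBlk_eq_of (cur end_ : Int) (t : Nat)
    (hb : ∀ j, j < t → PySem.Int.band cur ((2 : Int) ^ j) = 0)
    (hfit : (2 : Int) ^ t ≤ end_ + 1 - cur)
    (hstop : PySem.Int.band cur ((2 : Int) ^ t) ≠ 0 ∨ end_ + 1 - cur < (2 : Int) ^ (t + 1)) :
    ∀ j, j ≤ t → growBlk cur end_ ((2 : Int) ^ j) = 2 ^ t := by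
  have key : ∀ d j, j ≤ t → t - j = d → growBlk cur end_ ((2 : Int) ^ j) = 2 ^ t := by
    intro d
    induction d with
    | zero =>
        intro j hj hd
        have : j = t := by omega
        subst this
        rw [growBlk, dif_neg]
        rintro ⟨hband, hle, -⟩
        rcases hstop with hs | hs
        · exact hs hband
        · rw [Int.shiftLeft_eq, pow_one] at hle
          have he : (2 : Int) ^ (j + 1) = 2 ^ j * 2 := by ring
          omega
    | succ d ih =>
        intro j hj hd
        have hjt : j < t := by omega
        have hs : ((2 : Int) ^ j) <<< (1 : Nat) = 2 ^ (j + 1) := by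
          rw [Int.shiftLeft_eq]; ring
        have hfitj : cur + ((2 : Int) ^ j) <<< (1 : Nat) - 1 ≤ end_ := by
          rw [hs]
          have : (2 : Int) ^ (j + 1) ≤ 2 ^ t := by
            apply pow_le_pow_right₀ (by norm_num); omega
          omega
        rw [growBlk, dif_pos ⟨hb j hjt, hfitj, by positivity⟩, hs]
        exact ih (j + 1) (by omega) (by omega)
  intro j hj
  exact key (t - j) j hj rfl

-- the block A grows equals the block B computes directly
theorem blk_eq (cur end_ : Int) (h : cur ≤ end_) :
    growBlk cur end_ 1 = blkOf end_ cur := by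
  show growBlk cur end_ 1 =
    (1 : Int) <<< (if PySem.Int.band cur (-cur) = 0 then PySem.Int.bitLength (end_ - cur + 1) - 1
      else min (PySem.Int.bitLength (PySem.Int.band cur (-cur)) - 1)
        (PySem.Int.bitLength (end_ - cur + 1) - 1))
  obtain ⟨hsp1, hsp2, hsp3⟩ := span_bounds (end_ - cur + 1) (by omega)
  by_cases h0 : cur = 0
  · subst h0
    have hz : ∀ x : Int, PySem.Int.band 0 x = 0 := by
      intro x; rw [PySem.Int.band_comm]; exact PySem.Int.band_zero x
    rw [if_pos (hz _), Int.shiftLeft_eq, one_mul]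
    have hg := growBlk_eq_of 0 end_ (PySem.Int.bitLength (end_ - 0 + 1) - 1)
      (fun j _ => hz _) (by simpa using hsp1) (Or.inr (by simpa using hsp2)) 0 (Nat.zero_le _)
    simpa using hg
  · obtain ⟨c, m, hm, hn⟩ := Nat.exists_eq_two_pow_mul_odd (Int.natAbs_ne_zero.mpr h0)
    have hlow := band_lowbit cur c m hm hn h0
    rw [hlow, if_neg (show ((2 : Int) ^ c) ≠ 0 by positivity), bitLength_two_pow]
    simp only [Nat.add_sub_cancel]
    rw [Int.shiftLeft_eq, one_mul]
    have hb' : ∀ j, j < min c (PySem.Int.bitLength (end_ - cur + 1) - 1) →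
        PySem.Int.band cur ((2 : Int) ^ j) = 0 := by
      intro j hj
      rw [band_two_pow cur c m j hm hn h0 (by omega), if_pos (by omega)]
    have hfit' : (2 : Int) ^ (min c (PySem.Int.bitLength (end_ - cur + 1) - 1)) ≤ end_ + 1 - cur := by
      calc (2 : Int) ^ (min c (PySem.Int.bitLength (end_ - cur + 1) - 1))
          ≤ 2 ^ (PySem.Int.bitLength (end_ - cur + 1) - 1) := by
            apply pow_le_pow_right₀ (by norm_num)
            exact Nat.min_le_right _ _
        _ ≤ end_ + 1 - cur := by omega
    have hstop' : PySem.Int.band cur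
          ((2 : Int) ^ (min c (PySem.Int.bitLength (end_ - cur + 1) - 1))) ≠ 0 ∨
        end_ + 1 - cur < (2 : Int) ^ (min c (PySem.Int.bitLength (end_ - cur + 1) - 1) + 1) := by
      by_cases hc : c ≤ PySem.Int.bitLength (end_ - cur + 1) - 1
      · left
        rw [min_eq_left hc, band_two_pow cur c m c hm hn h0 (le_refl c), if_neg (by omega)]
        positivity
      · right
        rw [min_eq_right (by omega)]
        omega
    have hg := growBlk_eq_of cur end_ _ hb' hfit' hstop' 0 (Nat.zero_le _)
    simpa using hg

-- the two loops produce the same list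
theorem loop_eq (end_ width : Int) (cur : Int) :
    coverLoop end_ width cur = altLoop end_ (((1 : Int) <<< width.toNat) - 1) cur := by
  rw [coverLoop, altLoop]
  by_cases h : cur ≤ end_
  · rw [dif_pos h, dif_pos h, ← blk_eq cur end_ h]
    exact congrArg _ (loop_eq end_ width (cur + growBlk cur end_ 1))
  · rw [dif_neg h, dif_neg h]
termination_by (end_ + 1 - cur).toNat
decreasing_by
  have := growBlk_pos cur end_ 1 (by norm_num)
  omega

-- ===== VERDICT (by name: the statement is the Claim_ definition above) =====
theorem cover_range_with_prefixes_spec : Claim_equal_cover_range_with_prefixes := by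
  intro start end_ width _ _
  unfold Spec_cover_range_with_prefixes cover_range_with_prefixes cover_range_with_prefixes_alt
  exact loop_eq end_ width start
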